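-- pv_equiv track=rewrite | github.com/constatza/dlkit | src/dlkit/core/datatypes/tilde_expansion.py | _extract_netloc
-- ===== SOURCE A (Python) =====
-- def _extract_netloc(url: str) -> str:
--     scheme_sep = url.find("://")
--     if scheme_sep == -1:
--         return ""
--
--     remainder = url[scheme_sep + 3 :]
--     end = len(remainder)
--     for idx, ch in enumerate(remainder):
--         if ch in "/?#":
--             end = idx
--             break
--
--     return remainder[:end]
-- ===== SOURCE B (Python) =====
-- def _extract_netloc(url: str) -> str:
--     scheme_sep = url.find("://")
--     if scheme_sep == -1:
--         return ""
--     remainder = url[scheme_sep + 3:]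
--     hits = [p for p in (remainder.find(ch) for ch in "/?#") if p != -1]
--     end = min(hits) if hits else len(remainder)
--     return remainder[:end]
-- ===== Notes on version B (the rewrite author's own statement) =====
-- stated objective: idiomatic
-- what changed: A's sequential character scan with an early break is replaced by three independent str.find searches (one per delimiter '/', '?', '#') whose non-negative results are reduced with min, defaulting to len(remainder).
import Mathlib
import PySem

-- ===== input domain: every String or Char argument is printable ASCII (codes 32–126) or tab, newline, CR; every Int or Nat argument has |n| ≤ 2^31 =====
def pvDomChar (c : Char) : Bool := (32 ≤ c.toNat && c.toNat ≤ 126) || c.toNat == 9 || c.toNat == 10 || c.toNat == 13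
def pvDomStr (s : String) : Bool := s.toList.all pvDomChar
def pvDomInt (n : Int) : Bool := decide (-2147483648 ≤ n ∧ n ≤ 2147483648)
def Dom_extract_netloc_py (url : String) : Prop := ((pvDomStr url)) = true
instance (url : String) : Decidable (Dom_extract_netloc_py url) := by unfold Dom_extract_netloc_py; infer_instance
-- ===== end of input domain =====

-- B replaces A's sequential early-break scan by three independent find searches reduced with min (idiomatic decomposition; same O(n) cost).

-- ===== PORT A =====
-- the for-loop with early break: end starts at len(remainder), idx counts up, break on a delimiter
def pvLoopA : List Char → Nat → Nat → Nat
  | [], _, e => e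
  | c :: rest, idx, e =>
      if PySem.Chars.isIn [c] "/?#".toList then idx
      else pvLoopA rest (idx + 1) e

def extract_netloc_py (url : String) : String :=
  let scheme_sep := PySem.Str.find url "://"
  if scheme_sep = -1 then ""
  else
    let remainder := PySem.Str.slice url (some (scheme_sep + 3)) none
    let endv := pvLoopA remainder.toList 0 remainder.toList.length
    PySem.Str.slice remainder none (some (endv : Int))

-- ===== PORT B =====
def extract_netloc_py_alt (url : String) : String :=
  let scheme_sep := PySem.Str.find url "://"
  if scheme_sep = -1 then ""
  else
    let remainder := PySem.Str.slice url (some (scheme_sep + 3)) none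
    let hits := ("/?#".toList.map (fun ch => PySem.Str.find remainder (String.ofList [ch]))).filter
      (fun p => p ≠ -1)
    let endv : Int :=
      match PySem.List.min? hits (fun x => x) with
      | some m => m
      | none => PySem.Str.len remainder
    PySem.Str.slice remainder none (some endv)

-- ===== PRECONDITION & SPEC =====
def Spec_extract_netloc_py (url : String) (out : String) : Prop := out = extract_netloc_py_alt url
instance (url : String) (out : String) : Decidable (Spec_extract_netloc_py url out) := by unfold Spec_extract_netloc_py; infer_instance

-- ===== CLAIM (what is proved, stated in full; the proofs are below) =====
def Claim_equal_extract_netloc_py : Prop := ∀ (url : String), Dom_extract_netloc_py url → Spec_extract_netloc_py url (extract_netloc_py url)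

-- ===== LEMMAS AND PROOFS =====

def pvDelim (c : Char) : Bool := c == '/' || c == '?' || c == '#'

def pvKeep (c : Char) : Bool := !pvDelim c

theorem pvDelims_toList : "/?#".toList = ['/', '?', '#'] := by decide

theorem pv_singleton_prefix (c : Char) (l : List Char) : [c] <+: l ↔ l.head? = some c := by
  cases l with
  | nil => simp
  | cons x xs => simp [List.cons_prefix_cons, eq_comm]

theorem pv_singleton_infix (c : Char) (l : List Char) : [c] <:+: l ↔ c ∈ l := by
  constructor
  · intro h; exact h.subset (by simp)
  · intro h
    obtain ⟨s, t, rfl⟩ := List.append_of_mem h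
    exact ⟨s, t, by simp⟩

theorem pv_isIn_single (c : Char) (l : List Char) : PySem.Chars.isIn [c] l = true ↔ c ∈ l := by
  rw [PySem.Chars.isIn_iff_infix, pv_singleton_infix]

theorem pv_loop_eq (cs : List Char) : ∀ (idx e : Nat),
    pvLoopA cs idx e =
      if (cs.takeWhile pvKeep).length = cs.length then e
      else idx + (cs.takeWhile pvKeep).length := by
  induction cs with
  | nil => intro idx e; simp [pvLoopA]
  | cons c rest ih =>
    intro idx e
    have hiff : PySem.Chars.isIn [c] "/?#".toList = true ↔ pvDelim c = true := by
      rw [pv_isIn_single, pvDelims_toList]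
      simp [pvDelim]
      tauto
    by_cases hc : pvDelim c = true
    · have hk : pvKeep c = false := by simp [pvKeep, hc]
      rw [pvLoopA, if_pos (hiff.2 hc)]
      simp [List.takeWhile_cons, hk]
    · have hk : pvKeep c = true := by simp [pvKeep, hc]
      rw [pvLoopA, if_neg (fun h => hc (hiff.1 h)), ih]
      simp [List.takeWhile_cons, hk]
      split_ifs <;> omega

-- every position before the takeWhile frontier holds a non-delimiter
theorem pv_before_frontier (cs : List Char) : ∀ (i : Nat), i < (cs.takeWhile pvKeep).length →
    ∀ c, cs[i]? = some c → pvDelim c = false := by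
  induction cs with
  | nil => intro i h c hc; simp at hc
  | cons x rest ih =>
    intro i h c hc
    by_cases hx : pvKeep x = true
    · simp [List.takeWhile_cons, hx] at h
      cases i with
      | zero => simp at hc; subst hc; simpa [pvKeep] using hx
      | succ j => exact ih j (by omega) c (by simpa using hc)
    · simp [List.takeWhile_cons, hx] at h
-- the frontier position, if inside the list, holds a delimiter
theorem pv_at_frontier (cs : List Char) (h : (cs.takeWhile pvKeep).length < cs.length) :
    ∃ c, cs[(cs.takeWhile pvKeep).length]? = some c ∧ pvDelim c = true := by
  induction cs with
  | nil => simp at h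
  | cons x rest ih =>
    by_cases hx : pvKeep x = true
    · simp [List.takeWhile_cons, hx] at h ⊢
      obtain ⟨c, hc, hd⟩ := ih (by omega)
      exact ⟨c, by simpa using hc, hd⟩
    · refine ⟨x, by simp [List.takeWhile_cons, hx], ?_⟩
      simpa [pvKeep] using hx

-- a delimiter's find, when nonneg, sits exactly at / after the frontier; the frontier delimiter's find equals the frontier
theorem pv_find_single_nonneg (cs : List Char) (c : Char) (h : PySem.Chars.find cs [c] ≠ -1) :
    0 ≤ PySem.Chars.find cs [c] ∧ cs[(PySem.Chars.find cs [c]).toNat]? = some c ∧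
      ∀ i < (PySem.Chars.find cs [c]).toNat, cs[i]? ≠ some c := by
  have h0 : 0 ≤ PySem.Chars.find cs [c] := by
    rw [PySem.Chars.find_nonneg_iff]
    by_contra hin
    exact h ((PySem.Chars.find_eq_neg_one_iff cs [c]).2 hin)
  obtain ⟨hpre, hmin⟩ := PySem.Chars.find_spec h0
  refine ⟨h0, ?_, ?_⟩
  · rw [← List.head?_drop]; exact ((pv_singleton_prefix c _).1 hpre)
  · intro i hi hget
    exact hmin i hi ((pv_singleton_prefix c _).2 (by rw [List.head?_drop]; exact hget))

-- membership in "/?#" is pvDelim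
theorem pv_delim_mem (c : Char) : pvDelim c = true ↔ c ∈ "/?#".toList := by
  rw [pvDelims_toList]
  simp [pvDelim]
  tauto

-- core: the loop result equals min over the per-delimiter finds (−1 dropped, empty → length)
theorem pv_core (cs : List Char) :
    ((pvLoopA cs 0 cs.length : Nat) : Int) =
      match PySem.List.min? (("/?#".toList.map (fun ch => PySem.Chars.find cs [ch])).filter
          (fun p => p ≠ -1)) (fun x : Int => x) with
      | some m => m
      | none => (cs.length : Int) := by
  have htle : (cs.takeWhile pvKeep).length ≤ cs.length := (List.takeWhile_prefix pvKeep).length_le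
  rw [pv_loop_eq]
  by_cases hall : (cs.takeWhile pvKeep).length = cs.length
  · rw [if_pos hall]
    have hnil : (("/?#".toList.map (fun ch => PySem.Chars.find cs [ch])).filter
        (fun p => p ≠ -1)) = [] := by
      apply List.filter_eq_nil_iff.2
      intro a ha
      obtain ⟨ch, hch, rfl⟩ := List.mem_map.1 ha
      simp only [ne_eq, decide_not, Bool.not_eq_true', decide_eq_false_iff_not, Decidable.not_not]
      by_contra hne
      obtain ⟨h0, hget, -⟩ := pv_find_single_nonneg cs ch hne
      have hlt : (PySem.Chars.find cs [ch]).toNat < cs.length := by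
        by_contra hge
        rw [List.getElem?_eq_none (by omega)] at hget
        simp at hget
      have hfd := pv_before_frontier cs _ (by omega) ch hget
      rw [← pv_delim_mem] at hch
      rw [hfd] at hch
      exact Bool.noConfusion hch
    rw [hnil]
    rfl
  · rw [if_neg hall]
    have htlt : (cs.takeWhile pvKeep).length < cs.length := lt_of_le_of_ne htle hall
    obtain ⟨c0, hc0get, hc0d⟩ := pv_at_frontier cs htlt
    have hfind0 : PySem.Chars.find cs [c0] = ((cs.takeWhile pvKeep).length : Int) := by
      have hne : PySem.Chars.find cs [c0] ≠ -1 := by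
        intro heq
        have hnin := (PySem.Chars.find_eq_neg_one_iff cs [c0]).1 heq
        exact hnin ((pv_singleton_infix c0 cs).2 (List.mem_of_getElem? hc0get))
      obtain ⟨h0, hget, hmin⟩ := pv_find_single_nonneg cs c0 hne
      have hge : (cs.takeWhile pvKeep).length ≤ (PySem.Chars.find cs [c0]).toNat := by
        by_contra hlt2
        have hfd := pv_before_frontier cs _ (by omega) c0 hget
        rw [hfd] at hc0d
        exact Bool.noConfusion hc0d
      have hle2 : (PySem.Chars.find cs [c0]).toNat ≤ (cs.takeWhile pvKeep).length := by
        by_contra hgt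
        exact hmin _ (by omega) hc0get
      omega
    have hub : ∀ a ∈ (("/?#".toList.map (fun ch => PySem.Chars.find cs [ch])).filter
        (fun p => p ≠ -1)), ((cs.takeWhile pvKeep).length : Int) ≤ a := by
      intro a ha
      obtain ⟨hmem, hane⟩ := List.mem_filter.1 ha
      obtain ⟨ch, hch, rfl⟩ := List.mem_map.1 hmem
      have hane' : PySem.Chars.find cs [ch] ≠ -1 := by simpa using hane
      obtain ⟨h0, hget, -⟩ := pv_find_single_nonneg cs ch hane'
      by_contra hlt2
      have hfd := pv_before_frontier cs _ (by omega) ch hget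
      rw [← pv_delim_mem] at hch
      rw [hfd] at hch
      exact Bool.noConfusion hch
    have htmem : ((cs.takeWhile pvKeep).length : Int) ∈
        (("/?#".toList.map (fun ch => PySem.Chars.find cs [ch])).filter (fun p => p ≠ -1)) := by
      apply List.mem_filter.2
      refine ⟨List.mem_map.2 ⟨c0, (pv_delim_mem c0).1 hc0d, hfind0⟩, by simp⟩
    obtain ⟨m, hm⟩ : ∃ m, PySem.List.min? (("/?#".toList.map
        (fun ch => PySem.Chars.find cs [ch])).filter (fun p => p ≠ -1)) (fun x : Int => x)
        = some m := by
      cases hmm : PySem.List.min? (("/?#".toList.map (fun ch => PySem.Chars.find cs [ch])).filter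
          (fun p => p ≠ -1)) (fun x : Int => x) with
      | none =>
        rw [(PySem.List.min?_eq_none_iff _ _).1 hmm] at htmem
        exact absurd htmem (List.not_mem_nil)
      | some m => exact ⟨m, rfl⟩
    rw [hm]
    have h1 := PySem.List.min?_isMin hm _ htmem
    have h2 := hub m (PySem.List.min?_mem hm)
    simp only [Nat.zero_add] at *
    omega

-- ===== VERDICT =====
theorem extract_netloc_py_spec : Claim_equal_extract_netloc_py := by
  intro url _
  unfold Spec_extract_netloc_py extract_netloc_py extract_netloc_py_alt
  by_cases h : PySem.Str.find url "://" = -1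
  · rw [h]; simp
  · simp only [if_neg h]
    congr 1
    rw [pv_core (PySem.Str.slice url (some (PySem.Str.find url "://" + 3)) none).toList]
    simp [PySem.Str.find_eq, PySem.Str.len_eq]
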